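-- pv_equiv track=rewrite | github.com/calenwalshe/beatengine | src/techno_engine/fred_sync_variants.py | _nearest_in_scale
-- ===== SOURCE A (Python) =====
-- from typing import List, Sequence, Tuple
--
-- def _nearest_in_scale(p: int, pcs: Sequence[int]) -> int:
--     tgt = p % 12
--     if tgt in pcs:
--         return p
--     for d in range(1, 3):
--         if (p + d) % 12 in pcs:
--             return p + d
--         if (p - d) % 12 in pcs:
--             return p - d
--     return p
-- ===== SOURCE B (Python) =====
-- def _nearest_in_scale(p: int, pcs) -> int:
--     candidates = [d for d in range(-2, 3) if (p + d) % 12 in pcs]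
--     if not candidates:
--         return p
--     return p + min(candidates, key=lambda d: (abs(d), d < 0))
-- ===== Notes on version B (the rewrite author's own statement) =====
-- stated objective: simpler
-- what changed: Replaces A's short-circuit nested scan of offsets (0, +1, -1, +2, -2) with a gather-all comprehension over range(-2,3) followed by a single argmin whose key (abs(d), d<0) encodes A's nearest-then-positive tie-break.
import Mathlib
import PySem

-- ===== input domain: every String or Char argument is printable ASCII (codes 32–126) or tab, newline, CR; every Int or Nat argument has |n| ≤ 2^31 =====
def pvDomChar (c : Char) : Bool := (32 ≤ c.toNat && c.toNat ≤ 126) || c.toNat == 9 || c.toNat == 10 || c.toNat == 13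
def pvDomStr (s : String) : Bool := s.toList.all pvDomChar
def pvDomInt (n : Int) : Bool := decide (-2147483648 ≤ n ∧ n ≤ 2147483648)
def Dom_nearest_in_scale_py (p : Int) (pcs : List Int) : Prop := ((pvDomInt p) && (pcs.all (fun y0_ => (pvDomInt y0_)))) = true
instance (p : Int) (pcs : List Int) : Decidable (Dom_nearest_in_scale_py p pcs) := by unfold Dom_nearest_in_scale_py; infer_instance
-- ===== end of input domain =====

-- B replaces A's short-circuit nested offset scan with a gather-candidates-then-argmin decomposition (same cost, simpler).


-- ===== PORT A =====
-- the 'for d in range(1, 3)' loop with its two early returns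
def nearestLoopA (p : Int) (pcs : List Int) : List Int → Int
  | [] => p
  | d :: rest =>
    if pcs.contains (PySem.Int.mod (p + d) 12) then p + d
    else if pcs.contains (PySem.Int.mod (p - d) 12) then p - d
    else nearestLoopA p pcs rest

def nearest_in_scale_py (p : Int) (pcs : List Int) : Int :=
  let tgt := PySem.Int.mod p 12
  if pcs.contains tgt then p
  else nearestLoopA p pcs (PySem.List.pyRange 1 3 1)

-- ===== PORT B =====
-- key d = (abs(d), d < 0), compared lexicographically (False < True)
def keyB (d : Int) : Nat × Bool := (d.natAbs, decide (d < 0))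

def keyLtB (a b : Nat × Bool) : Bool :=
  a.1 < b.1 || (a.1 == b.1 && (!a.2 && b.2))

-- Python's min with key: first element with strictly least key
def minByB (c : Int) (rest : List Int) : Int :=
  rest.foldl (fun best d => if keyLtB (keyB d) (keyB best) then d else best) c

def nearest_in_scale_py_alt (p : Int) (pcs : List Int) : Int :=
  let candidates := (PySem.List.pyRange (-2) 3 1).filter
    (fun d => pcs.contains (PySem.Int.mod (p + d) 12))
  match candidates with
  | [] => p
  | c :: rest => p + minByB c rest

-- ===== PRECONDITION & SPEC =====
def Spec_nearest_in_scale_py (p : Int) (pcs : List Int) (out : Int) : Prop := out = nearest_in_scale_py_alt p pcs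
instance (p : Int) (pcs : List Int) (out : Int) : Decidable (Spec_nearest_in_scale_py p pcs out) := by unfold Spec_nearest_in_scale_py; infer_instance

-- ===== CLAIM (what is proved, stated in full; the proofs are below) =====
def Claim_equal_nearest_in_scale_py : Prop := ∀ (p : Int) (pcs : List Int), Dom_nearest_in_scale_py p pcs → Spec_nearest_in_scale_py p pcs (nearest_in_scale_py p pcs)

-- ===== LEMMAS AND PROOFS =====
theorem pyRange13 : PySem.List.pyRange 1 3 1 = [1, 2] := by decide

theorem pyRangeNeg23 : PySem.List.pyRange (-2) 3 1 = [-2, -1, 0, 1, 2] := by decide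

-- ===== VERDICT (by name: the statement is the Claim_ definition above) =====
set_option maxHeartbeats 2000000 in
theorem nearest_in_scale_py_spec : Claim_equal_nearest_in_scale_py := by
  intro p pcs _
  unfold Spec_nearest_in_scale_py nearest_in_scale_py nearest_in_scale_py_alt nearestLoopA
  rw [pyRange13, pyRangeNeg23]
  have e0 : p + (0 : Int) = p := by ring
  have em1 : p + (-1 : Int) = p - 1 := by ring
  have em2 : p + (-2 : Int) = p - 2 := by ring
  simp only [List.filter, e0, em1, em2]
  simp only [nearestLoopA, minByB, keyB, keyLtB, PySem.Int.mod, List.contains_eq_mem]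
  by_cases h0 : (Int.fmod p 12) ∈ pcs <;>
  by_cases h1 : (Int.fmod (p + 1) 12) ∈ pcs <;>
  by_cases h2 : (Int.fmod (p - 1) 12) ∈ pcs <;>
  by_cases h3 : (Int.fmod (p + 2) 12) ∈ pcs <;>
  by_cases h4 : (Int.fmod (p - 2) 12) ∈ pcs <;>
    simp [h0, h1, h2, h3, h4] <;> omega
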